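-- pv_equiv track=rewrite | github.com/HarisHidayatul/printer_read_pin | python/process_to_coordinate.py | downsample_character
-- ===== SOURCE A (Python) =====
-- def downsample_character(string_data, factor_h=2):
--     lines = [line for line in string_data.strip().split("\n")]
--
--     original_height = len(lines)
--     original_width = max(len(line) for line in lines)
--
--     # Jika tinggi kurang atau sama dengan 8, jangan lakukan filtering
--     if original_height <= 8:
--         return string_data
--
--     # Pastikan semua baris memiliki lebar yang sama (padding jika perlu)
--     lines = [line.ljust(original_width) for line in lines]
--
--     # Tentukan kolom yang akan difilter
--     columns_to_keep = set()
--     for start in range(0, original_width, 6):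
--         for col in range(start, min(start + 5, original_width)):
--             columns_to_keep.add(col)
--
--     # Buffer untuk menyimpan hasil
--     downsampled = []
--
--     # Iterasi dengan langkah `factor_h` untuk tinggi
--     for i in range(0, original_height - factor_h + 1, factor_h):
--         new_line = ""
--         for j in range(original_width):
--             if j in columns_to_keep:
--                 # Ambil blok (factor_h tinggi)
--                 block = [lines[i + k][j] for k in range(factor_h) if i + k < original_height]
--
--                 # Jika ada 'X' dalam blok, pertahankan bentuk
--                 new_line += "X" if "X" in block else " "
--             else:
--                 new_line += " "  # Pertahankan lebar dengan spasi
--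
--         downsampled.append(new_line)
--
--     return "\n".join(downsampled)
-- ===== SOURCE B (Python) =====
-- def downsample_character(string_data, factor_h=2):
--     lines = string_data.strip().split("\n")
--     height = len(lines)
--     if height <= 8:
--         return string_data
--     width = max(len(line) for line in lines)
--     lines = [line.ljust(width) for line in lines]
--
--     def or_rows(a, b):
--         # character-wise OR of two rows: 'X' wherever either row has an 'X'
--         return ''.join('X' if x == 'X' or y == 'X' else ' ' for x, y in zip(a, b))
--
--     def blank_every_sixth(row):
--         # drop every 6th column by chunked slicing: keep the first 5 chars
--         # of each 6-wide chunk and pad the rest of the chunk with spaces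
--         return ''.join(row[p:p + 6][:5] + ' ' * (len(row[p:p + 6]) - 5)
--                        for p in range(0, width, 6))
--
--     out = []
--     for i in range(0, height - factor_h + 1, factor_h):
--         merged = ' ' * width
--         for row in lines[i:i + factor_h]:
--             merged = or_rows(merged, row)
--         out.append(blank_every_sixth(merged))
--     return "\n".join(out)
-- ===== Notes on version B (the rewrite author's own statement) =====
-- stated objective: alternative
-- what changed: Replaces A's per-cell nested loop (set-membership column test plus per-cell vertical block gather) by row-level operations: each block is merged by folding a character-wise OR of whole rows starting from a blank row, and every 6th column is blanked afterwards by slicing the merged row into 6-wide chunks and keeping each chunk's first 5 characters.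
import Mathlib
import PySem

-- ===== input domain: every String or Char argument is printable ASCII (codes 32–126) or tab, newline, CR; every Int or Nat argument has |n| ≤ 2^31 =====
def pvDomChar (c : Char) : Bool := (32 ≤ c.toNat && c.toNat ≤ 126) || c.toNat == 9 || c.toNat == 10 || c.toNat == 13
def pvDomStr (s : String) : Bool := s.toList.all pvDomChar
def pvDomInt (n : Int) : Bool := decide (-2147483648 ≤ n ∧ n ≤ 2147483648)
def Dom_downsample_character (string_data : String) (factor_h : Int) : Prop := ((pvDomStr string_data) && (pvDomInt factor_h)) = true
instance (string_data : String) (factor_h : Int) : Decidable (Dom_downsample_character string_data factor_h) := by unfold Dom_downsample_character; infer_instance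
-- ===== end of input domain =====

-- B replaces A's per-cell nested loop (set-membership column test + per-cell vertical block gather) by
-- row-level operations: fold a character-wise OR over the block's rows, then blank every 6th column by
-- chunked slicing (alternative decomposition, same cost).

-- ===== PORT A =====
def downsample_character (string_data : String) (factor_h : Int) : String :=
  let lines := PySem.Chars.splitOn (PySem.Chars.strip string_data.toList) ['\n']
  let original_height : Int := lines.length
  -- max(len(line) for line in lines): lines is never empty (split returns ≥ 1 piece), so the getD default is unreachable
  let original_width : Int := (PySem.List.max? (lines.map (fun l => (l.length : Int))) (fun x => x)).getD 0
  if original_height ≤ 8 then string_data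
  else
    let lines := lines.map (fun l => l ++ List.replicate (original_width.toNat - l.length) ' ')  -- line.ljust(original_width)
    let columns_to_keep : PySem.Set Int :=
      (PySem.List.pyRange 0 original_width 6).foldl (fun s start =>
        (PySem.List.pyRange start (min (start + 5) original_width) 1).foldl (fun s col => s.add col) s)
        PySem.Set.empty
    let downsampled : List (List Char) :=
      (PySem.List.pyRange 0 (original_height - factor_h + 1) factor_h).foldl (fun acc i =>
        let new_line := (PySem.List.pyRange 0 original_width 1).foldl (fun nl j =>
          if j ∈ columns_to_keep then
            -- lines[i + k][j]: both indices are in range inside Pre_, where pyGetD is exact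
            let block := ((PySem.List.pyRange 0 factor_h 1).filter (fun k => i + k < original_height)).map
              (fun k => PySem.List.pyGetD (PySem.List.pyGetD lines (i + k) []) j ' ')
            nl ++ (if 'X' ∈ block then ['X'] else [' '])
          else nl ++ [' ']) ([] : List Char)
        acc ++ [new_line]) []
    String.ofList (PySem.Chars.join ['\n'] downsampled)

-- ===== PORT B =====
-- or_rows(a, b): character-wise OR of two rows
def pvOrRows (a b : List Char) : List Char :=
  (a.zip b).map (fun p => if p.1 == 'X' || p.2 == 'X' then 'X' else ' ')

-- blank_every_sixth(row): keep the first 5 chars of each 6-wide chunk, pad the rest with spaces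
def pvBlank6 (row : List Char) (width : Int) : List Char :=
  PySem.Chars.join [] ((PySem.List.pyRange 0 width 6).map (fun p =>
    let chunk := PySem.List.slice row (some p) (some (p + 6))
    PySem.List.slice chunk none (some 5) ++ List.replicate (chunk.length - 5) ' '))

def downsample_character_alt (string_data : String) (factor_h : Int) : String :=
  let lines := PySem.Chars.splitOn (PySem.Chars.strip string_data.toList) ['\n']
  let height : Int := lines.length
  if height ≤ 8 then string_data
  else
    -- max(len(line) for line in lines): lines is never empty here (height > 8)
    let width : Int := (PySem.List.max? (lines.map (fun l => (l.length : Int))) (fun x => x)).getD 0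
    let lines := lines.map (fun l => l ++ List.replicate (width.toNat - l.length) ' ')  -- line.ljust(width)
    let out : List (List Char) :=
      (PySem.List.pyRange 0 (height - factor_h + 1) factor_h).foldl (fun acc i =>
        let merged := (PySem.List.slice lines (some i) (some (i + factor_h))).foldl pvOrRows
          (List.replicate width.toNat ' ')  -- merged = ' ' * width, then OR in each row of lines[i:i+factor_h]
        acc ++ [pvBlank6 merged width]) []
    String.ofList (PySem.Chars.join ['\n'] out)

-- ===== PRECONDITION & SPEC =====
-- Pre_ excludes exactly the inputs where A raises: factor_h = 0 with more than 8 lines makes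
-- range(0, height - 0 + 1, 0) raise ValueError (with ≤ 8 lines A returns early and never builds that range).
def Pre_downsample_character (string_data : String) (factor_h : Int) : Prop :=
  factor_h = 0 → (PySem.Chars.splitOn (PySem.Chars.strip string_data.toList) ['\n']).length ≤ 8
instance (string_data : String) (factor_h : Int) : Decidable (Pre_downsample_character string_data factor_h) := by
  unfold Pre_downsample_character; infer_instance
def pvWitness_downsample_character : String × Int := ("X\n X\nX\n X\nX\n X\nX\n X\nX\n X", 2)
def Spec_downsample_character (string_data : String) (factor_h : Int) (out : String) : Prop := out = downsample_character_alt string_data factor_h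
instance (string_data : String) (factor_h : Int) (out : String) : Decidable (Spec_downsample_character string_data factor_h out) := by unfold Spec_downsample_character; infer_instance

-- ===== CLAIM (what is proved, stated in full; the proofs are below) =====
def Claim_equal_downsample_character : Prop := ∀ (string_data : String) (factor_h : Int), Dom_downsample_character string_data factor_h → Pre_downsample_character string_data factor_h → Spec_downsample_character string_data factor_h (downsample_character string_data factor_h)

-- ===== LEMMAS AND PROOFS =====

-- range with negative step and stop at or above start is empty
theorem pyRange_nil_of_neg {a b s : Int} (hs : s < 0) (hab : a ≤ b) :
    PySem.List.pyRange a b s = [] := by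
  unfold PySem.List.pyRange
  rw [if_neg (by omega), if_neg (by omega), if_neg (by omega)]
  simp

-- peeling one element off a positive-step range
theorem pyRange_pos_cons {a b s : Int} (hs : 0 < s) (hab : a < b) :
    PySem.List.pyRange a b s = a :: PySem.List.pyRange (a + s) b s := by
  rw [PySem.List.pyRange_of_pos a b hs, PySem.List.pyRange_of_pos (a + s) b hs, if_pos hab]
  have h1 : (b - a + s - 1) / s = (b - (a + s) + s - 1) / s + 1 := by
    rw [show b - a + s - 1 = (b - (a + s) + s - 1) + 1 * s by ring]
    exact Int.add_mul_ediv_right _ 1 (by omega)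
  by_cases h2 : a + s < b
  · rw [if_pos h2]
    have hq : 0 ≤ (b - (a + s) + s - 1) / s := Int.ediv_nonneg (by omega) (by omega)
    rw [h1, show ((b - (a + s) + s - 1) / s + 1).toNat = ((b - (a + s) + s - 1) / s).toNat + 1 by omega]
    rw [List.range_succ_eq_map, List.map_cons, List.map_map]
    simp only [Nat.cast_zero, mul_zero, add_zero]
    congr 1
    apply List.map_congr_left
    intro k _
    simp only [Function.comp_apply, Nat.succ_eq_add_one]
    push_cast
    ring
  · rw [if_neg h2]
    have hq : (b - (a + s) + s - 1) / s = 0 :=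
      Int.ediv_eq_zero_of_lt (by omega) (by omega)
    rw [h1, hq]
    simp
  
-- membership in a fold of Set.add
theorem mem_foldl_add {l : List Int} {s : PySem.Set Int} {x : Int} :
    x ∈ l.foldl (fun s c => s.add c) s ↔ x ∈ s ∨ x ∈ l := by
  induction l generalizing s with
  | nil => simp
  | cons y ys ih =>
    simp only [List.foldl_cons, ih, PySem.Set.mem_add, List.mem_cons]
    tauto

-- A's columns_to_keep set contains exactly the in-range columns with j % 6 ≠ 5
theorem mem_keep_set {W j : Int} (h0 : 0 ≤ j) (hW : j < W) :
    (j ∈ (PySem.List.pyRange 0 W 6).foldl (fun s start =>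
        (PySem.List.pyRange start (min (start + 5) W) 1).foldl (fun s col => s.add col) s)
        PySem.Set.empty) ↔ j % 6 ≠ 5 := by
  have key : ∀ (l : List Int) (s : PySem.Set Int),
      (j ∈ l.foldl (fun s start =>
        (PySem.List.pyRange start (min (start + 5) W) 1).foldl (fun s col => s.add col) s) s) ↔
      j ∈ s ∨ ∃ t ∈ l, j ∈ PySem.List.pyRange t (min (t + 5) W) 1 := by
    intro l
    induction l with
    | nil => simp
    | cons y ys ih =>
      intro s
      simp only [List.foldl_cons, ih, mem_foldl_add, List.mem_cons]
      constructor
      · rintro (⟨h | h⟩ | h)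
        · exact Or.inl h
        · exact Or.inr ⟨y, Or.inl rfl, h⟩
        · obtain ⟨t, ht, hj⟩ := h; exact Or.inr ⟨t, Or.inr ht, hj⟩
      · rintro (h | ⟨t, (rfl | ht), hj⟩)
        · exact Or.inl (Or.inl h)
        · exact Or.inl (Or.inr hj)
        · exact Or.inr ⟨t, ht, hj⟩
  rw [key]
  simp only [PySem.Set.empty, List.not_mem_nil, false_or,
    PySem.List.mem_pyRange_iff_of_pos (by omega : (0:Int) < 6),
    PySem.List.mem_pyRange_iff_of_pos (by omega : (0:Int) < 1)]
  constructor
  · rintro ⟨t, ⟨ht0, htW, hdvd⟩, htj, hjlt, -⟩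
    omega
  · intro hne
    exact ⟨j - j % 6, ⟨by omega, by omega, by omega⟩, by omega, by omega, by omega⟩

-- B's row slice, rewritten as indexing along A's range(factor_h)
theorem slice_eq_map_pyRange (P : List (List Char)) {i f : Int}
    (hi : 0 ≤ i) (hf : 0 < f) (hif : i + f ≤ (P.length : Int)) :
    PySem.List.slice P (some i) (some (i + f)) =
      (PySem.List.pyRange 0 f 1).map (fun k => PySem.List.pyGetD P (i + k) []) := by
  rw [PySem.List.slice_toNat P hi (by omega)]
  apply List.ext_getElem
  · simp [PySem.List.length_pyRange_one]
    omega
  · intro m hm1 hm2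
    rw [List.getElem_take, List.getElem_drop]
    rw [List.getElem_map, PySem.List.getElem_pyRange_one]
    have hmf : (m : Int) < f := by
      have := hm2
      simp [PySem.List.length_pyRange_one] at this
      omega
    rw [PySem.List.pyGetD_eq_getElem P [] (by omega) (by omega)]
    congr 1
    omega

-- ''.join over a list of chunks is flatten
theorem join_nil_eq_flatten (ls : List (List Char)) :
    PySem.Chars.join [] ls = ls.flatten := by
  induction ls with
  | nil => simp [PySem.Chars.join_nil]
  | cons p rest ih =>
    cases rest with
    | nil => simp [PySem.Chars.join_singleton]
    | cons q t =>
      rw [PySem.Chars.join_cons_cons, List.flatten_cons, ih]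
      simp

-- pvOrRows: length and pointwise value
theorem orRows_length (a b : List Char) : (pvOrRows a b).length = min a.length b.length := by
  simp [pvOrRows]

theorem orRows_getD (a b : List Char) {n j : Nat} (ha : a.length = n) (hb : b.length = n)
    (hj : j < n) :
    (pvOrRows a b).getD j ' ' =
      if a.getD j ' ' = 'X' ∨ b.getD j ' ' = 'X' then 'X' else ' ' := by
  have hlen : j < (pvOrRows a b).length := by rw [orRows_length]; omega
  rw [List.getD_eq_getElem _ _ hlen, List.getD_eq_getElem _ _ (by omega),
    List.getD_eq_getElem _ _ (by omega)]
  simp only [pvOrRows, List.getElem_map, List.getElem_zip]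
  split_ifs with h1 h2 h2 <;> simp_all

-- the OR-fold over a block of equal-width rows: width is preserved …
theorem foldl_orRows_length (rs : List (List Char)) (m0 : List Char) (n : Nat)
    (h0 : m0.length = n) (hrs : ∀ r ∈ rs, r.length = n) :
    (rs.foldl pvOrRows m0).length = n := by
  induction rs generalizing m0 with
  | nil => simpa using h0
  | cons r t ih =>
    rw [List.foldl_cons]
    exact ih _ (by rw [orRows_length, h0, hrs r (by simp)]; omega)
      (fun r' hr' => hrs r' (by simp [hr']))

-- … and each cell is 'X' exactly when some row of the block has 'X' there
theorem foldl_orRows_getD (rs : List (List Char)) (m0 : List Char) (n : Nat)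
    (h0 : m0.length = n) (hrs : ∀ r ∈ rs, r.length = n)
    (hv : ∀ j, j < n → m0.getD j ' ' = 'X' ∨ m0.getD j ' ' = ' ')
    {j : Nat} (hj : j < n) :
    (rs.foldl pvOrRows m0).getD j ' ' =
      if m0.getD j ' ' = 'X' ∨ rs.any (fun r => r.getD j ' ' == 'X') then 'X' else ' ' := by
  induction rs generalizing m0 with
  | nil =>
    simp only [List.foldl_nil, List.any_nil, Bool.false_eq_true, or_false]
    rcases hv j hj with h | h <;> rw [h] <;> simp
  | cons r t ih =>
    rw [List.foldl_cons]
    have hr : r.length = n := hrs r (by simp)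
    have h0' : (pvOrRows m0 r).length = n := by rw [orRows_length, h0, hr]; omega
    rw [ih _ h0' (fun r' hr' => hrs r' (by simp [hr']))
      (fun j' hj' => by rw [orRows_getD m0 r h0 hr hj']; split_ifs <;> simp)]
    rw [orRows_getD m0 r h0 hr hj, List.any_cons]
    by_cases hA : m0.getD j ' ' = 'X' <;> by_cases hB : r.getD j ' ' = 'X' <;>
      by_cases hC : (t.any fun r => r.getD j ' ' == 'X') = true <;>
      simp_all [List.getD]

-- chunked blanking equals the per-column formula: keep m[j] unless j % 6 = 5
theorem blank_chunks (m : List Char) (W : Int) (hm : (m.length : Int) = W) :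
    ∀ (a : Int), 0 ≤ a → a % 6 = 0 →
    ((PySem.List.pyRange a W 6).map (fun p =>
      let chunk := PySem.List.slice m (some p) (some (p + 6))
      PySem.List.slice chunk none (some 5) ++ List.replicate (chunk.length - 5) ' ')).flatten
    = (PySem.List.pyRange a W 1).map (fun j => if j % 6 = 5 then ' ' else m.getD j.toNat ' ') := by
  intro a
  induction hn : (W - a).toNat using Nat.strong_induction_on generalizing a with
  | _ n ih =>
  intro ha0 ha6
  by_cases hWa : W ≤ a
  · rw [PySem.List.pyRange_of_pos a W (by omega), if_neg (by omega),
      PySem.List.pyRange_one_eq_nil hWa]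
    simp
  · rw [not_le] at hWa
    rw [pyRange_pos_cons (by omega : (0:Int) < 6) hWa, List.map_cons, List.flatten_cons]
    rw [PySem.List.pyRange_one_append a (min (a + 6) W) W (by omega) (by omega), List.map_append]
    have htail : (PySem.List.pyRange (min (a + 6) W) W 1).map
        (fun j => if j % 6 = 5 then ' ' else m.getD j.toNat ' ') =
        (PySem.List.pyRange (a + 6) W 1).map
        (fun j => if j % 6 = 5 then ' ' else m.getD j.toNat ' ') := by
      rcases le_or_gt (a + 6) W with h | h
      · rw [min_eq_left h]
      · rw [min_eq_right (by omega), PySem.List.pyRange_one_eq_nil le_rfl,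
          PySem.List.pyRange_one_eq_nil (by omega)]
    rw [htail, ih ((W - (a + 6)).toNat) (by omega) (a + 6) rfl (by omega) (by omega)]
    congr 1
    -- the head chunk
    have h6 : (a + 6).toNat = a.toNat + 6 := by omega
    rw [PySem.List.slice_toNat m ha0 (by omega), h6,
      show a.toNat + 6 - a.toNat = 6 by omega]
    simp only [PySem.List.slice_to _ (by omega : (0:Int) ≤ 5), show ((5:Int)).toNat = 5 from rfl]
    have hcl : ((m.drop a.toNat).take 6).length = min 6 (m.length - a.toNat) := by simp
    apply List.ext_getElem
    · simp [PySem.List.length_pyRange_one]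
      omega
    · intro r hr1 hr2
      have hrcl : r < min 6 (m.length - a.toNat) := by
        rw [List.length_append, hcl] at hr1
        simp at hr1
        omega
      rw [List.getElem_map, PySem.List.getElem_pyRange_one]
      have hmod : (a + (r : Int)) % 6 = (r : Int) := by omega
      by_cases hr5 : r < 5
      · rw [List.getElem_append, dif_pos (by simp; omega)]
        rw [List.getElem_take, List.getElem_take, List.getElem_drop]
        rw [if_neg (by omega)]
        rw [show (a + (r : Int)).toNat = a.toNat + r by omega,
          List.getD_eq_getElem _ _ (by omega)]
      · rw [List.getElem_append, dif_neg (by simp; omega)]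
        rw [List.getElem_replicate, if_pos (by omega)]

-- the per-block output lines of A and B coincide
theorem line_eq (P : List (List Char)) (H W f i : Int)
    (hP : (P.length : Int) = H) (hrows : ∀ r ∈ P, (r.length : Int) = W)
    (hW0 : 0 ≤ W) (hf : 0 < f) (hi0 : 0 ≤ i) (hif : i + f ≤ H) :
    ((PySem.List.pyRange 0 W 1).foldl (fun nl j =>
        if j ∈ (PySem.List.pyRange 0 W 6).foldl (fun s start =>
            (PySem.List.pyRange start (min (start + 5) W) 1).foldl (fun s col => s.add col) s)
            PySem.Set.empty then
          nl ++ (if 'X' ∈ ((PySem.List.pyRange 0 f 1).filter (fun k => i + k < H)).map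
              (fun k => PySem.List.pyGetD (PySem.List.pyGetD P (i + k) []) j ' ') then ['X'] else [' '])
        else nl ++ [' ']) ([] : List Char)) =
    pvBlank6 ((PySem.List.slice P (some i) (some (i + f))).foldl pvOrRows
      (List.replicate W.toNat ' ')) W := by
  have hblock : ∀ r ∈ PySem.List.slice P (some i) (some (i + f)), r.length = W.toNat := by
    intro r hr
    have := hrows r (PySem.List.mem_of_mem_slice P _ _ hr)
    omega
  have hmlen : ((PySem.List.slice P (some i) (some (i + f))).foldl pvOrRows
      (List.replicate W.toNat ' ')).length = W.toNat :=
    foldl_orRows_length _ _ _ (by simp) hblock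
  -- B side: join is flatten, then the chunk decomposition
  rw [pvBlank6, join_nil_eq_flatten,
    blank_chunks _ W (by omega) 0 le_rfl (by omega)]
  -- A side: foldl appending singletons is a map
  rw [PySem.List.foldl_congr_mem _ _ (fun nl j => nl ++
      [if j ∈ (PySem.List.pyRange 0 W 6).foldl (fun s start =>
            (PySem.List.pyRange start (min (start + 5) W) 1).foldl (fun s col => s.add col) s)
            PySem.Set.empty then
          (if 'X' ∈ ((PySem.List.pyRange 0 f 1).filter (fun k => i + k < H)).map
              (fun k => PySem.List.pyGetD (PySem.List.pyGetD P (i + k) []) j ' ') then 'X' else ' ')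
        else ' ']) _ (by
    intro acc j _
    beta_reduce
    split_ifs <;> rfl)]
  rw [PySem.List.foldl_append_singleton_eq_map, List.nil_append]
  apply List.map_congr_left
  intro j hj
  rw [PySem.List.mem_pyRange_one] at hj
  obtain ⟨hj0, hjW⟩ := hj
  by_cases h5 : j % 6 = 5
  · rw [if_neg ((mem_keep_set hj0 hjW).not.mpr (by omega)), if_pos h5]
  · rw [if_pos ((mem_keep_set hj0 hjW).mpr h5), if_neg h5]
    -- the filter keeps every k in range(factor_h): i + k < i + f ≤ H
    rw [List.filter_eq_self.mpr (by
      intro k hk'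
      rw [PySem.List.mem_pyRange_one] at hk'
      simp only [decide_eq_true_eq]
      omega)]
    rw [foldl_orRows_getD _ _ W.toNat (by simp) hblock
      (fun j' hj' => Or.inr (List.getD_replicate ' ' hj')) (by omega : j.toNat < W.toNat)]
    rw [List.getD_replicate ' ' (by omega)]
    simp only [show (' ' = 'X') ↔ False from by decide, false_or]
    rw [slice_eq_map_pyRange P hi0 hf (by omega), List.any_map]
    by_cases hx : 'X' ∈ (PySem.List.pyRange 0 f 1).map
        (fun k => PySem.List.pyGetD (PySem.List.pyGetD P (i + k) []) j ' ')
    · rw [if_pos hx, if_pos (by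
        obtain ⟨k, hkmem, hkx⟩ := List.mem_map.mp hx
        refine List.any_eq_true.mpr ⟨k, hkmem, ?_⟩
        simp only [Function.comp, beq_iff_eq]
        rw [← PySem.List.pyGetD_of_nonneg _ ' ' hj0]
        exact hkx)]
    · rw [if_neg hx, if_neg (by
        intro hany
        obtain ⟨k, hkmem, hkx⟩ := List.any_eq_true.mp hany
        simp only [Function.comp, beq_iff_eq] at hkx
        refine hx (List.mem_map.mpr ⟨k, hkmem, ?_⟩)
        rw [PySem.List.pyGetD_of_nonneg _ ' ' hj0]
        exact hkx)]

-- ===== VERDICT (by name: the statement is the Claim_ definition above) =====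
theorem downsample_character_spec : Claim_equal_downsample_character := by
  intro s f _ hpre
  unfold Spec_downsample_character downsample_character downsample_character_alt
  simp only []
  set L := PySem.Chars.splitOn (PySem.Chars.strip s.toList) ['\n'] with hL
  set W : Int := (PySem.List.max? (L.map (fun l => (l.length : Int))) (fun x => x)).getD 0 with hW
  by_cases h8 : (L.length : Int) ≤ 8
  · rw [if_pos h8, if_pos h8]
  · rw [if_neg h8, if_neg h8]
    have hf0 : f ≠ 0 := by
      intro h
      exact h8 (by exact_mod_cast hpre h)
    -- W is the maximum line length: every line fits, and W ≥ 0
    have hLne : L ≠ [] := by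
      intro h
      rw [h] at h8
      simp at h8
    obtain ⟨mval, hmval⟩ : ∃ mval, PySem.List.max? (L.map (fun l => (l.length : Int))) (fun x => x) = some mval := by
      cases hcase : PySem.List.max? (L.map (fun l => (l.length : Int))) (fun x => x) with
      | none =>
        rw [PySem.List.max?_eq_none_iff] at hcase
        exact absurd (List.map_eq_nil_iff.mp hcase) hLne
      | some v => exact ⟨v, rfl⟩
    have hWm : W = mval := by rw [hW, hmval]; rfl
    have hW0 : 0 ≤ W := by
      obtain ⟨l, _, hl⟩ := List.mem_map.mp (PySem.List.max?_mem hmval)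
      omega
    have hWmax : ∀ l ∈ L, (l.length : Int) ≤ W := by
      intro l hl
      rw [hWm]
      exact PySem.List.max?_isMax hmval _ (List.mem_map.mpr ⟨l, hl, rfl⟩)
    refine congrArg (fun t => String.ofList (PySem.Chars.join ['\n'] t)) ?_
    set P := L.map (fun l => l ++ List.replicate (W.toNat - l.length) ' ') with hPdef
    have hPlen : (P.length : Int) = (L.length : Int) := by simp [hPdef]
    have hrows : ∀ r ∈ P, (r.length : Int) = W := by
      intro r hr
      obtain ⟨l, hl, rfl⟩ := List.mem_map.mp (hPdef ▸ hr)
      have := hWmax l hl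
      simp
      omega
    clear_value P
    clear_value W
    clear_value L
    rcases lt_or_gt_of_ne hf0 with hneg | hpos
    · rw [pyRange_nil_of_neg hneg (by omega : (0:Int) ≤ (L.length : Int) - f + 1)]
      rw [List.foldl_nil, List.foldl_nil]
    · apply PySem.List.foldl_congr_mem
      intro acc i hi
      rw [PySem.List.mem_pyRange_iff_of_pos hpos] at hi
      obtain ⟨hi0, hilt, -⟩ := hi
      congr 1
      apply congrArg (fun x => [x])
      exact line_eq P (L.length : Int) W f i hPlen hrows hW0 hpos hi0 (by omega)
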